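-- pv_equiv track=rewrite | github.com/thommi2phones/macro-analyzer | src/macro_positioning/brain/heuristic.py | _count_markers
-- ===== SOURCE A (Python) =====
-- NEGATIONS = ("not ", "no longer", "isn't", "isn", "aren't", "aren", "won't",
--              "will not", "never", "stop ", "stopping", "fails to")
--
-- def _count_markers(lowered: str, markers: tuple[str, ...]) -> int:
--     """Count marker occurrences, discounting ones immediately preceded by a negation."""
--     count = 0
--     for marker in markers:
--         idx = 0
--         while True:
--             pos = lowered.find(marker, idx)
--             if pos < 0:
--                 break
--             window = lowered[max(0, pos - 24):pos]
--             if not any(neg in window for neg in NEGATIONS):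
--                 count += 1
--             idx = pos + len(marker)
--     return count
-- ===== SOURCE B (Python) =====
-- NEGATIONS = ("not ", "no longer", "isn't", "isn", "aren't", "aren", "won't",
--              "will not", "never", "stop ", "stopping", "fails to")
--
-- def _count_markers(lowered: str, markers: tuple[str, ...]) -> int:
--     """Count marker occurrences, discounting ones preceded (within 24 chars) by a negation.
--
--     Different decomposition: build an index of all negation occurrences once,
--     then test each marker match against that index arithmetically instead of
--     slicing a window and substring-searching it per match."""
--     neg_occs = [(q, q + len(neg))
--                 for neg in NEGATIONS
--                 for q in range(len(lowered))
--                 if lowered.startswith(neg, q)]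
--     count = 0
--     for marker in markers:
--         pos = lowered.find(marker)
--         while pos >= 0:
--             if not any(q >= pos - 24 and e <= pos for (q, e) in neg_occs):
--                 count += 1
--             pos = lowered.find(marker, pos + len(marker))
--     return count
-- ===== Notes on version B (the rewrite author's own statement) =====
-- stated objective: alternative
-- what changed: Instead of slicing a 24-char window before each marker match and substring-searching it for all 12 negation phrases, B precomputes one index of all negation occurrences (start, end) and discounts a match at pos by the arithmetic test start >= pos-24 and end <= pos.
import Mathlib
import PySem

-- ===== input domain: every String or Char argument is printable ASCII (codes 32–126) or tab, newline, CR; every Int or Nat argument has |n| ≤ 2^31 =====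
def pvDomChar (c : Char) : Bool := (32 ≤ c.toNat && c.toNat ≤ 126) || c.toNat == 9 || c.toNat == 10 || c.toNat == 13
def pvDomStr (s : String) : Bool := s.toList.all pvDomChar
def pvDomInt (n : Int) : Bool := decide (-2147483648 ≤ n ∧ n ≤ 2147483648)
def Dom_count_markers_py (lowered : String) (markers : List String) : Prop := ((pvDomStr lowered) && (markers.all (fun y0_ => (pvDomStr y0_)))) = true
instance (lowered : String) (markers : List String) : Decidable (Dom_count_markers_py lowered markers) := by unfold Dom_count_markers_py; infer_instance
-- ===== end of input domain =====

-- B replaces A's per-match 24-char window slicing + substring search by a negation-occurrence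
-- index built once, tested arithmetically per marker match (objective: alternative decomposition).

-- Termination facts for the ports' while-loops (cited in decreasing_by):
theorem pvFindFrom_gt_len (s sub : List Char) (k : Nat) (h : s.length < k) :
    PySem.Chars.findFrom s sub (k:Int) none = -1 := by
  simp only [PySem.Chars.findFrom]
  have : (s.length:Int) < (k:Int) := by exact_mod_cast h
  simp
  omega

theorem pvFindFrom_le (s sub : List Char) (st : Int) :
    PySem.Chars.findFrom s sub st none ≤ s.length := by
  simp only [PySem.Chars.findFrom]
  have hf := PySem.Chars.find_le_length (List.drop (if st < 0 then if st + ↑s.length < 0 then 0 else st + ↑s.length else st).toNat (List.take (s.length:Int).toNat s)) sub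
  split_ifs <;> simp_all <;> omega

-- ===== PORT A =====
def pvNEGATIONS : List String := ["not ", "no longer", "isn't", "isn", "aren't", "aren", "won't",
  "will not", "never", "stop ", "stopping", "fails to"]

-- the 'while True' loop of A, per marker; the 'idx < idx'' guard only makes the function total:
-- the Python loop advances iff marker ≠ "" (Pre_), and diverges otherwise.
def pvALoop (lowered marker : String) (idx : Nat) (count : Int) : Int :=
  let pos := PySem.Str.findFrom lowered marker (idx : Int)
  if h1 : pos < 0 then count
  else
    let window := PySem.Str.slice lowered (some (max 0 (pos - 24))) (some pos)
    let count' := if pvNEGATIONS.any (fun neg => PySem.Str.isIn neg window) then count else count + 1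
    let idx' := pos.toNat + marker.toList.length
    if h2 : idx < idx' then pvALoop lowered marker idx' count' else count'
termination_by lowered.toList.length + 1 - idx
decreasing_by
  have hidx' : idx' = pos.toNat + marker.toList.length := rfl
  have hk : idx ≤ lowered.toList.length := by
    by_contra hgt
    apply h1
    have hp : pos = PySem.Str.findFrom lowered marker (idx:Int) := rfl
    rw [hp, PySem.Str.findFrom_eq, pvFindFrom_gt_len _ _ _ (by omega)]; norm_num
  omega

def count_markers_py (lowered : String) (markers : List String) : Int :=
  markers.foldl (fun count marker => pvALoop lowered marker 0 count) 0

-- ===== PORT B =====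
-- neg_occs: (start, end) of every negation occurrence; 'lowered.startswith(neg, q)' is ported,
-- exactly for the 0 ≤ q < len(lowered) produced by range, as startswith on the drop at q.
def pvNegOccs (lowered : String) : List (Int × Int) :=
  pvNEGATIONS.flatMap (fun neg =>
    ((PySem.List.pyRange 0 (PySem.Str.len lowered) 1).filter
        (fun q => PySem.Chars.startswith (lowered.toList.drop q.toNat) neg.toList)).map
      (fun q => (q, q + PySem.Str.len neg)))

-- the 'while pos >= 0' loop of B, per marker; the 'pos < pos'' guard only makes the function
-- total: the Python loop advances iff marker ≠ "" (Pre_), and diverges otherwise.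
def pvBLoop (lowered marker : String) (negOccs : List (Int × Int)) (pos : Int) (count : Int) : Int :=
  if h1 : pos < 0 then count
  else
    let count' := if negOccs.any (fun qe => decide (qe.1 ≥ pos - 24) && decide (qe.2 ≤ pos)) then count else count + 1
    let pos' := PySem.Str.findFrom lowered marker (pos + PySem.Str.len marker)
    if h2 : pos < pos' then pvBLoop lowered marker negOccs pos' count' else count'
termination_by lowered.toList.length + 1 - pos.toNat
decreasing_by
  have e : pos' = PySem.Str.findFrom lowered marker (pos + PySem.Str.len marker) := rfl
  have hle : pos' ≤ (lowered.toList.length:Int) := by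
    rw [e, PySem.Str.findFrom_eq]; exact pvFindFrom_le _ _ _
  omega

def count_markers_py_alt (lowered : String) (markers : List String) : Int :=
  let negOccs := pvNegOccs lowered
  markers.foldl (fun count marker => pvBLoop lowered marker negOccs (PySem.Str.find lowered marker) count) 0

-- ===== PRECONDITION & SPEC =====
-- Pre_ excludes an empty-string marker, on which A's (and B's) while-loop never terminates
-- (str.find('', idx) returns idx forever).
def Pre_count_markers_py (lowered : String) (markers : List String) : Prop := "" ∉ markers
instance (lowered : String) (markers : List String) : Decidable (Pre_count_markers_py lowered markers) := by unfold Pre_count_markers_py; infer_instance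

def pvWitness_count_markers_py : String × List String := ("he is not happy now", ["happy", "now"])

def Spec_count_markers_py (lowered : String) (markers : List String) (out : Int) : Prop := out = count_markers_py_alt lowered markers
instance (lowered : String) (markers : List String) (out : Int) : Decidable (Spec_count_markers_py lowered markers out) := by unfold Spec_count_markers_py; infer_instance

-- ===== CLAIM (what is proved, stated in full; the proofs are below) =====
def Claim_equal_count_markers_py : Prop := ∀ (lowered : String) (markers : List String), Dom_count_markers_py lowered markers → Pre_count_markers_py lowered markers → Spec_count_markers_py lowered markers (count_markers_py lowered markers)

-- ===== LEMMAS AND PROOFS =====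

theorem pvSliceWindow (cs : List Char) (pos : Int) (h0 : 0 ≤ pos) :
    PySem.List.slice cs (some (max 0 (pos-24))) (some pos)
      = (cs.drop (max 0 (pos-24)).toNat).take (pos.toNat - (max 0 (pos-24)).toNat) := by
  rw [PySem.List.slice_toNat cs (le_max_left _ _) h0]

-- a marker match at pos is preceded by a negation in the 24-char window iff some negation
-- occurrence (q, e) satisfies pos - 24 ≤ q and e ≤ pos
theorem pvWindow_core (cs neg : List Char) (hne : neg ≠ []) (pos : Int) (h0 : 0 ≤ pos) :
    (neg <:+: (cs.drop (max 0 (pos-24)).toNat).take (pos.toNat - (max 0 (pos-24)).toNat))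
    ↔ ∃ q : Int, (0 ≤ q ∧ q < (cs.length:Int)) ∧ neg <+: cs.drop q.toNat ∧ pos - 24 ≤ q ∧ q + (neg.length:Int) ≤ pos := by
  set a : Nat := (max 0 (pos-24)).toNat with ha
  have haI : (a:Int) = max 0 (pos-24) := by omega
  set b : Nat := pos.toNat with hb
  constructor
  · intro hinf
    rw [← PySem.Chars.isIn_iff_infix, ← PySem.Chars.exists_prefix_drop_iff_isIn] at hinf
    obtain ⟨j, hj⟩ := hinf
    rw [List.drop_take, List.drop_drop] at hj
    rw [List.prefix_take_iff] at hj
    obtain ⟨hpre, hlen⟩ := hj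
    have hnl : 0 < neg.length := List.length_pos_iff.mpr hne
    have hq : a + j < cs.length := by
      by_contra hcon
      rw [List.drop_eq_nil_of_le (by omega)] at hpre
      exact hne (List.prefix_nil.mp hpre)
    refine ⟨((a+j : Nat) : Int), ⟨by omega, by omega⟩, ?_, by omega, by omega⟩
    simpa using hpre
  · rintro ⟨q, ⟨hq0, hql⟩, hpre, hq24, hqlen⟩
    have haq : (a:Int) ≤ q := by omega
    set j : Nat := q.toNat - a with hj
    have hqj : a + j = q.toNat := by omega
    have h1 : neg <+: (cs.drop a |>.take (b - a)).drop j := by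
      rw [List.drop_take, List.drop_drop, List.prefix_take_iff, hqj]
      exact ⟨hpre, by omega⟩
    exact (h1.isInfix).trans (List.drop_suffix j _).isInfix

theorem pvNeg_nonnil : ∀ neg ∈ pvNEGATIONS, neg.toList ≠ [] := by decide

-- the two negation tests agree at every match position
theorem pvAny_eq (lowered : String) (pos : Int) (h0 : 0 ≤ pos) :
    pvNEGATIONS.any (fun neg => PySem.Str.isIn neg (PySem.Str.slice lowered (some (max 0 (pos - 24))) (some pos)))
    = (pvNegOccs lowered).any (fun qe => decide (qe.1 ≥ pos - 24) && decide (qe.2 ≤ pos)) := by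
  rw [Bool.eq_iff_iff]
  simp only [List.any_eq_true, pvNegOccs, List.mem_flatMap, List.mem_map, List.mem_filter,
    PySem.List.mem_pyRange_one, PySem.Str.len_eq]
  constructor
  · rintro ⟨neg, hmem, hin⟩
    rw [PySem.Str.isIn_eq, PySem.Chars.isIn_iff_infix, PySem.Str.toList_slice,
      PySem.Chars.slice_eq_listSlice, pvSliceWindow lowered.toList pos h0] at hin
    obtain ⟨q, ⟨hq0, hql⟩, hpre, hq24, hqlen⟩ :=
      (pvWindow_core lowered.toList neg.toList (pvNeg_nonnil neg hmem) pos h0).mp hin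
    exact ⟨(q, q + neg.toList.length),
      ⟨neg, hmem, q, ⟨⟨hq0, hql⟩, (PySem.Chars.startswith_iff _ _).mpr hpre⟩, rfl⟩,
      by simp only [Bool.and_eq_true, decide_eq_true_eq]; exact ⟨by omega, by omega⟩⟩
  · rintro ⟨qe, ⟨neg, hmem, q, ⟨⟨hq0, hql⟩, hsw⟩, rfl⟩, hcond⟩
    simp only [Bool.and_eq_true, decide_eq_true_eq] at hcond
    refine ⟨neg, hmem, ?_⟩
    rw [PySem.Str.isIn_eq, PySem.Chars.isIn_iff_infix, PySem.Str.toList_slice,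
      PySem.Chars.slice_eq_listSlice, pvSliceWindow lowered.toList pos h0]
    exact (pvWindow_core lowered.toList neg.toList (pvNeg_nonnil neg hmem) pos h0).mpr
      ⟨q, ⟨hq0, hql⟩, (PySem.Chars.startswith_iff _ _).mp hsw, by omega⟩

-- A's while-loop starting at idx equals B's while-loop handed the find result at idx
set_option maxHeartbeats 1600000 in
theorem pvLoops_eq (lowered marker : String) (hm : marker.toList ≠ []) (idx : Nat) (count : Int) :
    pvALoop lowered marker idx count
      = pvBLoop lowered marker (pvNegOccs lowered) (PySem.Str.findFrom lowered marker (idx:Int)) count := by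
  generalize hn : lowered.toList.length + 1 - idx = n
  induction n using Nat.strong_induction_on generalizing idx count with
  | _ n ih =>
    rw [pvALoop, pvBLoop]
    by_cases h1 : PySem.Str.findFrom lowered marker (idx:Int) < 0
    · rw [dif_pos h1, dif_pos h1]
    · have h1C : ¬PySem.Chars.findFrom lowered.toList marker.toList (idx:Int) < 0 := by
        rwa [PySem.Str.findFrom_eq] at h1
      have h0 : 0 ≤ PySem.Str.findFrom lowered marker (idx:Int) := by
        rw [PySem.Str.findFrom_eq]; omega
      have hk : idx ≤ lowered.toList.length := by
        by_contra hgt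
        exact absurd (by rw [pvFindFrom_gt_len _ _ _ (by omega)]; norm_num :
          PySem.Chars.findFrom lowered.toList marker.toList (idx:Int) < 0) h1C
      obtain ⟨hge, hpre, -⟩ := PySem.Chars.findFrom_natCast_spec lowered.toList marker.toList idx hk (by omega)
      have hmlen : 0 < marker.toList.length := List.length_pos_of_ne_nil hm
      have hbound : (PySem.Chars.findFrom lowered.toList marker.toList (idx:Int)).toNat + marker.toList.length ≤ lowered.toList.length := by
        have h2 := hpre.length_le
        simp only [List.length_drop] at h2
        omega
      have hA : idx < (PySem.Str.findFrom lowered marker (idx:Int)).toNat + marker.toList.length := by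
        rw [PySem.Str.findFrom_eq]; omega
      have harg : PySem.Str.findFrom lowered marker (idx:Int) + PySem.Str.len marker
          = (((PySem.Str.findFrom lowered marker (idx:Int)).toNat + marker.toList.length : Nat) : Int) := by
        simp only [PySem.Str.findFrom_eq, PySem.Str.len_eq]; omega
      rw [dif_neg h1, dif_neg h1]
      simp only []
      rw [pvAny_eq lowered (PySem.Str.findFrom lowered marker (idx:Int)) h0]
      rw [harg]
      rw [dif_pos hA]
      have hih := ih (lowered.toList.length + 1 - ((PySem.Str.findFrom lowered marker (idx:Int)).toNat + marker.toList.length))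
        (by rw [PySem.Str.findFrom_eq]; omega)
        ((PySem.Str.findFrom lowered marker (idx:Int)).toNat + marker.toList.length)
        (if ((pvNegOccs lowered).any fun qe => decide (qe.1 ≥ PySem.Str.findFrom lowered marker (idx:Int) - 24) && decide (qe.2 ≤ PySem.Str.findFrom lowered marker (idx:Int))) = true then count else count + 1)
        rfl
      rw [hih]
      by_cases hlt : PySem.Str.findFrom lowered marker (idx:Int)
          < PySem.Str.findFrom lowered marker (((PySem.Str.findFrom lowered marker (idx:Int)).toNat + marker.toList.length : Nat) : Int)
      · rw [dif_pos hlt]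
      · rw [dif_neg hlt]
        have hneg : PySem.Str.findFrom lowered marker (((PySem.Str.findFrom lowered marker (idx:Int)).toNat + marker.toList.length : Nat) : Int) < 0 := by
          simp only [PySem.Str.findFrom_eq]
          by_contra hge2
          simp only [PySem.Str.findFrom_eq] at hlt
          by_cases hlen : (PySem.Chars.findFrom lowered.toList marker.toList (idx:Int)).toNat + marker.toList.length ≤ lowered.toList.length
          · have hspec2 := PySem.Chars.findFrom_natCast_spec lowered.toList marker.toList
              ((PySem.Chars.findFrom lowered.toList marker.toList (idx:Int)).toNat + marker.toList.length) hlen (by omega)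
            omega
          · rw [pvFindFrom_gt_len _ _ _ (by omega)] at hge2
            omega
        rw [pvBLoop, dif_pos hneg]

-- ===== VERDICT (by name: the statement is the Claim_ definition above) =====
theorem count_markers_py_spec : Claim_equal_count_markers_py := by
  intro lowered markers _hdom hpre
  unfold Spec_count_markers_py count_markers_py count_markers_py_alt
  refine PySem.List.foldl_congr_mem markers _ _ 0 ?_
  intro acc m hmmem
  have hm : m.toList ≠ [] := by
    intro h
    exact hpre (String.toList_eq_nil_iff.mp h ▸ hmmem)
  rw [pvLoops_eq lowered m hm 0 acc]
  simp [PySem.Str.findFrom_eq, PySem.Str.find_eq, PySem.Chars.findFrom_zero]
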